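-- pv_equiv track=rewrite | github.com/Deepak-Sethiii/NewsBriefly | utils.py | extract_headlines
-- ===== SOURCE A (Python) =====
-- def extract_headlines(cleaned_text: str) -> str:
--     headlines, current_block = [], []
--     lines = [line.strip() for line in cleaned_text.split('\n') if line.strip()]
--     for line in lines:
--         if line == "More":
--             if current_block:
--                 headlines.append(current_block[0])
--                 current_block = []
--         else:
--             current_block.append(line)
--     if current_block:
--         headlines.append(current_block[0])
--     return "\n".join(headlines)
-- ===== SOURCE B (Python) =====
-- def extract_headlines(cleaned_text: str) -> str:
--     headlines = []
--     need_headline = True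
--     for raw in cleaned_text.split('\n'):
--         line = raw.strip()
--         if not line:
--             continue
--         if line == "More":
--             need_headline = True
--         elif need_headline:
--             headlines.append(line)
--             need_headline = False
--     return "\n".join(headlines)
-- ===== Notes on version B (the rewrite author's own statement) =====
-- stated objective: simpler
-- what changed: Replaced the current_block buffer list (flushed at 'More' or end of input) with a single boolean need_headline flag that records each block's first line eagerly, removing the intermediate list and the end-of-loop flush.
import Mathlib
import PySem

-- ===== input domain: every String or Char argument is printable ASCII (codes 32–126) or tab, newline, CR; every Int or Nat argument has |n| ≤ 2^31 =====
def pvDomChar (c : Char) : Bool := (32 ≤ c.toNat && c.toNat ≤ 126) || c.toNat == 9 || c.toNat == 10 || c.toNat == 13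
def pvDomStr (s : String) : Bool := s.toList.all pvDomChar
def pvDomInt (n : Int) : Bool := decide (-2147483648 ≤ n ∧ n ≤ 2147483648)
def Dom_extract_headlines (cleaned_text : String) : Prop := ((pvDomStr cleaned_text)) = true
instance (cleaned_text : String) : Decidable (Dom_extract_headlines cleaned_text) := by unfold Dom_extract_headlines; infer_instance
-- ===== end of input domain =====

-- B replaces A's current_block buffer (flushed at 'More'/end) with a boolean flag recording each block's first line eagerly: simpler, same cost.

-- ===== PORT A =====
-- step of A's for-loop over (headlines, current_block)
def pvAStep (acc : List String × List String) (line : String) : List String × List String :=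
  if line = "More" then
    if acc.2 ≠ [] then (acc.1 ++ [acc.2.head!], []) else acc
  else (acc.1, acc.2 ++ [line])

def extract_headlines (cleaned_text : String) : String :=
  let lines := (((PySem.Str.split? cleaned_text "\n").getD []).filter
      (fun line => PySem.Str.strip line ≠ "")).map PySem.Str.strip
  let st := lines.foldl pvAStep ([], [])
  let headlines := if st.2 ≠ [] then st.1 ++ [st.2.head!] else st.1
  PySem.Str.join "\n" headlines

-- ===== PORT B =====
-- step of B's for-loop over (headlines, need_headline)
def pvBStep (acc : List String × Bool) (raw : String) : List String × Bool :=
  let line := PySem.Str.strip raw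
  if line = "" then acc
  else if line = "More" then (acc.1, true)
  else if acc.2 then (acc.1 ++ [line], false)
  else acc

def extract_headlines_alt (cleaned_text : String) : String :=
  let st := ((PySem.Str.split? cleaned_text "\n").getD []).foldl pvBStep ([], true)
  PySem.Str.join "\n" st.1

-- ===== PRECONDITION & SPEC =====
def Spec_extract_headlines (cleaned_text : String) (out : String) : Prop := out = extract_headlines_alt cleaned_text
instance (cleaned_text : String) (out : String) : Decidable (Spec_extract_headlines cleaned_text out) := by unfold Spec_extract_headlines; infer_instance

-- ===== CLAIM (what is proved, stated in full; the proofs are below) =====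
def Claim_equal_extract_headlines : Prop := ∀ (cleaned_text : String), Dom_extract_headlines cleaned_text → Spec_extract_headlines cleaned_text (extract_headlines cleaned_text)

-- ===== LEMMAS AND PROOFS =====

-- A's end-of-loop flush of the accumulator
def pvFlush (acc : List String × List String) : List String :=
  if acc.2 ≠ [] then acc.1 ++ [acc.2.head!] else acc.1

-- B's fold over the raw split lines equals a fold of its non-empty branch over A's stripped, filtered lines
lemma bfold_eq_filtered (raws : List String) (s : List String × Bool) :
    raws.foldl pvBStep s
      = (((raws.filter (fun line => PySem.Str.strip line ≠ "")).map PySem.Str.strip).foldl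
          (fun acc line =>
            if line = "More" then (acc.1, true)
            else if acc.2 then (acc.1 ++ [line], false)
            else acc) s) := by
  induction raws generalizing s with
  | nil => rfl
  | cons r rs ih =>
    by_cases h : PySem.Str.strip r = ""
    · simp [pvBStep, h, ih]
    · simp [pvBStep, h, ih]

-- loop invariant: B's state is (flush of A's state, A's buffer is empty)
lemma inv_fold (lines : List String) (h c : List String) :
    lines.foldl
      (fun acc line =>
        if line = "More" then (acc.1, true)
        else if acc.2 then (acc.1 ++ [line], false)
        else acc) (pvFlush (h, c), c.isEmpty)
      = (pvFlush (lines.foldl pvAStep (h, c)), (lines.foldl pvAStep (h, c)).2.isEmpty) := by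
  induction lines generalizing h c with
  | nil => rfl
  | cons l ls ih =>
    by_cases hm : l = "More"
    · cases c with
      | nil => simpa [pvAStep, pvFlush, hm] using ih h []
      | cons c0 cs => simpa [pvAStep, pvFlush, hm] using ih (h ++ [c0]) []
    · cases c with
      | nil => simpa [pvAStep, pvFlush, hm] using ih h [l]
      | cons c0 cs => simpa [pvAStep, pvFlush, hm] using ih h (c0 :: cs ++ [l])

-- ===== VERDICT (by name: the statement is the Claim_ definition above) =====
theorem extract_headlines_spec : Claim_equal_extract_headlines := by
  intro t _
  unfold Spec_extract_headlines extract_headlines extract_headlines_alt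
  rw [bfold_eq_filtered]
  have h := inv_fold ((((PySem.Str.split? t "\n").getD []).filter
      (fun line => PySem.Str.strip line ≠ "")).map PySem.Str.strip) [] []
  simp only [pvFlush, ne_eq, decide_not, ite_not, List.isEmpty_nil,
    if_true] at h ⊢
  rw [h]
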